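-- pv_equiv track=rewrite | github.com/belang/blackbean | xiaoxiao/xiaoxiao/action.py | revert_wire_coord
-- ===== SOURCE A (Python) =====
-- def revert_wire_coord(coord):
--     """将canvas的wire坐标反转。"""
--     t = []
--     new_coord = []
--     for x in range(0, len(coord), 2):
--         t.append(coord[x:x+2])
--     t.reverse()
--     for x in t:
--         new_coord.extend(x)
--     return new_coord
-- ===== SOURCE B (Python) =====
-- def revert_wire_coord(coord):
--     """将canvas的wire坐标反转。"""
--     new_coord = []
--     start = ((len(coord) - 1) // 2) * 2
--     for i in range(start, -1, -2):
--         new_coord.extend(coord[i:i+2])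
--     return new_coord
-- ===== Notes on version B (the rewrite author's own statement) =====
-- stated objective: simpler
-- what changed: Instead of building an intermediate list of 2-chunks, reversing it and flattening it in a second loop, B computes the index of the last 2-chunk and emits the chunks directly in one backward-stepping pass.
import Mathlib
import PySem

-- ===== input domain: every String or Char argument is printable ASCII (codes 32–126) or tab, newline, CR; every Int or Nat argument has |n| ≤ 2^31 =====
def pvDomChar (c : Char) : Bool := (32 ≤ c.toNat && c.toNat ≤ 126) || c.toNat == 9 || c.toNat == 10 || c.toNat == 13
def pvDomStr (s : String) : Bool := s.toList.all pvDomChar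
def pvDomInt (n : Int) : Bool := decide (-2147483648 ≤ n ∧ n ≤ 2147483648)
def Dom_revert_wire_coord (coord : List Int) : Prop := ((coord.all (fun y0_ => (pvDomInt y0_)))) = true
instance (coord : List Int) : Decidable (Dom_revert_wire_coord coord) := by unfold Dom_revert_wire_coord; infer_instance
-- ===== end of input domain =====

-- B replaces A's build-pairs / reverse / flatten pipeline by a single backward pass from the
-- last 2-chunk (objective: simpler — one loop, no intermediate pair list).

-- ===== PORT A =====
def revert_wire_coord (coord : List Int) : List Int :=
  let t : List (List Int) :=
    (PySem.List.pyRange 0 (coord.length : Int) 2).foldl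
      (fun t x => t ++ [PySem.List.slice coord (some x) (some (x + 2))]) []
  let t2 := t.reverse
  t2.foldl (fun nc x => nc ++ x) []

-- ===== PORT B =====
def revert_wire_coord_alt (coord : List Int) : List Int :=
  let start := PySem.Int.floordiv ((coord.length : Int) - 1) 2 * 2
  (PySem.List.pyRange start (-1) (-2)).foldl
    (fun nc i => nc ++ PySem.List.slice coord (some i) (some (i + 2))) []

-- ===== PRECONDITION & SPEC =====
def Spec_revert_wire_coord (coord : List Int) (out : List Int) : Prop := out = revert_wire_coord_alt coord
instance (coord : List Int) (out : List Int) : Decidable (Spec_revert_wire_coord coord out) := by unfold Spec_revert_wire_coord; infer_instance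

-- ===== CLAIM (what is proved, stated in full; the proofs are below) =====
def Claim_equal_revert_wire_coord : Prop := ∀ (coord : List Int), Dom_revert_wire_coord coord → Spec_revert_wire_coord coord (revert_wire_coord coord)

-- ===== LEMMAS AND PROOFS =====

-- B's countdown range is exactly the reverse of A's forward range.
lemma pyRange_down_eq_reverse (n : Nat) :
    PySem.List.pyRange (PySem.Int.floordiv ((n : Int) - 1) 2 * 2) (-1) (-2)
      = (PySem.List.pyRange 0 (n : Int) 2).reverse := by
  rcases Nat.eq_zero_or_pos n with h0 | hpos
  · subst h0
    decide
  · have hfd : PySem.Int.floordiv ((n : Int) - 1) 2 = ((n : Int) - 1) / 2 := by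
      unfold PySem.Int.floordiv
      rw [Int.fdiv_eq_ediv]
      simp
    set s : Int := ((n : Int) - 1) / 2 * 2 with hs
    have hsval : s = ((n : Int) - 1) / 2 * 2 := hs
    have hn1 : (1 : Int) ≤ (n : Int) := by exact_mod_cast hpos
    have hsnn : 0 ≤ s := by
      have : 0 ≤ ((n : Int) - 1) / 2 := Int.ediv_nonneg (by omega) (by norm_num)
      omega
    -- unfold both ranges to their map-over-range form
    rw [hfd, ← hs]
    rw [PySem.List.pyRange_of_pos 0 (n : Int) (by norm_num : (0:Int) < 2)]
    simp only [PySem.List.pyRange]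
    have hstep : (-2 : Int) ≠ 0 := by norm_num
    rw [if_neg hstep]
    have hnotpos : ¬ (0 : Int) < -2 := by norm_num
    rw [if_neg hnotpos]
    have hlt : (-1 : Int) < s := by omega
    rw [if_pos hlt, if_pos (by omega : (0:Int) < (n : Int))]
    -- counts agree
    have hcount : ((s - -1 + - -2 - 1) / -(-2)).toNat = (((n : Int) - 0 + 2 - 1) / 2).toNat := by
      have h1 : (s - -1 + - -2 - 1) / -(-2) = s / 2 + 1 := by
        have e1 : s - -1 + - -2 - 1 = s + 2 := by ring
        have e2 : -(-2 : Int) = 2 := by norm_num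
        rw [e1, e2]
        omega
      have h2 : ((n : Int) - 0 + 2 - 1) / 2 = ((n : Int) - 1) / 2 + 1 := by omega
      rw [h1, h2, hsval]
      have : ((n : Int) - 1) / 2 * 2 / 2 = ((n : Int) - 1) / 2 := by
        omega
      rw [this]
    rw [hcount]
    set c : Nat := (((n : Int) - 0 + 2 - 1) / 2).toNat with hc
    have hcs : s = 2 * ((c : Int) - 1) := by
      have : (c : Int) = ((n : Int) - 1) / 2 + 1 := by
        rw [hc]
        have h2 : ((n : Int) - 0 + 2 - 1) / 2 = ((n : Int) - 1) / 2 + 1 := by omega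
        rw [h2]
        have : 0 ≤ ((n : Int) - 1) / 2 := Int.ediv_nonneg (by omega) (by norm_num)
        omega
      rw [hsval, this]; ring
    apply List.ext_getElem
    · simp
    · intro i h1 h2
      simp only [List.getElem_map, List.getElem_reverse, List.length_map, List.length_range,
        List.getElem_range] at *
      have hi : i < c := by simpa using h1
      have : ((c - 1 - i : Nat) : Int) = (c : Int) - 1 - (i : Int) := by omega
      rw [this]
      rw [hcs]
      ring

-- flattening fold: left fold of append over a list of lists is flatten
lemma foldl_append_flatten (l : List (List Int)) :
    l.foldl (fun nc x => nc ++ x) [] = l.flatten := by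
  have := PySem.List.foldl_append_eq_flatMap (g := fun x : List Int => x) l []
  simpa [List.flatMap_def] using this

-- flattening a list of singleton lists is a map
lemma flatten_map_single (g : Int → List Int) (l : List Int) :
    (l.map (fun x => [g x])).flatten = l.map g := by
  induction l with
  | nil => rfl
  | cons a l ih => simp [ih]

-- ===== VERDICT (by name: the statement is the Claim_ definition above) =====
theorem revert_wire_coord_spec : Claim_equal_revert_wire_coord := by
  intro coord _
  unfold Spec_revert_wire_coord revert_wire_coord revert_wire_coord_alt
  simp only []
  rw [pyRange_down_eq_reverse coord.length]
  rw [PySem.List.foldl_append_eq_flatMap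
        (g := fun i => PySem.List.slice coord (some i) (some (i + 2)))]
  rw [PySem.List.foldl_append_eq_flatMap
        (g := fun x => [PySem.List.slice coord (some x) (some (x + 2))])]
  rw [foldl_append_flatten]
  simp only [List.nil_append, List.flatMap_def, List.map_reverse]
  rw [flatten_map_single]
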